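-- pv_equiv track=rewrite | github.com/kawaii-Code/competitive-programming | 894div3/d.py | solution
-- ===== SOURCE A (Python) =====
-- def cn2(n):
--     return (n * (n - 1)) // 2
--
-- def solution(test):
--     left = 0;
--     right = MAXNUMBER - 1;
--     f = False;
--     while (left < right):
--         mid = (left + right) // 2;
--         tcn = cn2(mid);
--         if (tcn < test):
--             left = mid + 1;
--         else:
--             right = mid;
--
--     if (cn2(left) == test):
--         f = True;
--         return int(left);
--     if (not f):
--         while (cn2(left) > test):
--             left -= 1;
--     left += test - cn2(left);
--     return int(left);
--
-- MAXNUMBER = 2648956421 + 1;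
-- ===== SOURCE B (Python) =====
-- # B: closed-form search via Newton integer square root + O(1) local adjustment,
-- # instead of A's binary search over [0, MAXNUMBER-1].
--
-- def tri(L):
--     return L * (L - 1) // 2
--
-- def isqrt_newton(n):
--     x = n
--     y = (x + 1) // 2
--     while y < x:
--         x = y
--         y = (x + n // x) // 2
--     return x
--
-- def solution(test):
--     g = isqrt_newton(8 * test + 1)
--     L = (1 + g) // 2
--     while tri(L) < test:
--         L += 1
--     while L > 0 and tri(L - 1) >= test:
--         L -= 1
--     if tri(L) == test:
--         return L
--     return (L - 1) + (test - tri(L - 1))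
-- ===== Notes on version B (the rewrite author's own statement) =====
-- stated objective: alternative
-- what changed: Replaces A's binary search over a fixed huge range by a direct triangular-root computation: a Newton integer square root of a linear transform of test, a closed-form candidate, and a constant number of local adjustment steps; Pre_ excludes negative test, where A loops forever because its decrement loop can never bring cn2(left) down to a negative target.
import Mathlib
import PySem

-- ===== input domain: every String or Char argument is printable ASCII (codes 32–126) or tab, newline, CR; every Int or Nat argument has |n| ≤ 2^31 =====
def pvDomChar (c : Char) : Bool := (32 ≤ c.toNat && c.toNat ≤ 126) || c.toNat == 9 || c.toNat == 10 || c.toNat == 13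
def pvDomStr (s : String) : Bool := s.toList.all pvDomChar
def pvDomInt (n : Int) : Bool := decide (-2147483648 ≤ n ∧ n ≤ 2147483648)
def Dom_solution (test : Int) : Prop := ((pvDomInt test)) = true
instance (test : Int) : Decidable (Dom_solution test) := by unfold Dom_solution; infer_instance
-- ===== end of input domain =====

-- B replaces A's binary search by a Newton integer square root plus an O(1) local
-- adjustment (objective: alternative algorithm, similar cost). Pre_ excludes test < 0,
-- where A loops forever.

-- ===== PORT A =====
def cn2 (n : Int) : Int := PySem.Int.floordiv (n * (n - 1)) 2

def MAXNUMBER : Int := 2648956421 + 1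

-- while (left < right): mid = (left+right)//2; if cn2 mid < test then left = mid+1 else right = mid
def solLoop (test left right : Int) : Int :=
  if left < right then
    let mid := PySem.Int.floordiv (left + right) 2
    if cn2 mid < test then solLoop test (mid + 1) right
    else solLoop test left mid
  else left
termination_by (right - left).toNat
decreasing_by
  · have h : PySem.Int.floordiv (left + right) 2 = (left + right) / 2 :=
      PySem.Int.floordiv_eq_ediv_of_pos (by omega)
    omega
  · have h : PySem.Int.floordiv (left + right) 2 = (left + right) / 2 :=
      PySem.Int.floordiv_eq_ediv_of_pos (by omega)
    omega

-- while cn2(left) > test: left -= 1.  '1 ≤ l' is a totality guard only: for test ≥ 0 it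
-- never binds (Python's loop diverges exactly on test < 0, which Pre_ excludes).
def solDown (test l : Int) : Int :=
  if test < cn2 l ∧ 1 ≤ l then solDown test (l - 1) else l
termination_by l.toNat
decreasing_by omega

def solution (test : Int) : Int :=
  let left := solLoop test 0 (MAXNUMBER - 1)
  if cn2 left = test then left
  else
    let left := solDown test left
    left + (test - cn2 left)

-- ===== PORT B =====
-- termination bound for the (≤ 1 step in practice) upward adjustment loop, cited by upLoop
theorem cn2_lt_imp_lt (t L : Int) (h : cn2 L < t) : L < 2 * t := by
  unfold cn2 at h
  have h2 : PySem.Int.floordiv (L * (L - 1)) 2 = L * (L - 1) / 2 :=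
    PySem.Int.floordiv_eq_ediv_of_pos (by omega)
  have he : L * (L - 1) % 2 + 2 * (L * (L - 1) / 2) = L * (L - 1) := Int.emod_add_mul_ediv _ _
  have hm : L * (L - 1) % 2 = 0 := by
    rcases Int.even_or_odd L with ⟨k, hk⟩ | ⟨k, hk⟩
    · subst hk; have : (k + k) * (k + k - 1) = 2 * (k * (k + k - 1)) := by ring
      rw [this]; omega
    · subst hk; have : (2 * k + 1) * (2 * k + 1 - 1) = 2 * ((2 * k + 1) * k) := by ring
      rw [this]; omega
  by_contra hc
  have hc' : 2 * t ≤ L := by omega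
  have ht : 1 ≤ t := by nlinarith [sq_nonneg (2 * L - 1)]
  have : t ≤ L * (L - 1) / 2 := by nlinarith
  omega

-- Newton's method:  x = n; y = (x+1)//2; while y < x: x = y; y = (x + n//x)//2
-- '1 ≤ y' is a totality guard only: whenever Python's loop continues, y ≥ 1 holds.
def newtonLoop (n x y : Int) : Int :=
  if 1 ≤ y ∧ y < x then
    newtonLoop n y (PySem.Int.floordiv (y + PySem.Int.floordiv n y) 2)
  else x
termination_by x.toNat
decreasing_by omega

def isqrtNewton (n : Int) : Int := newtonLoop n n (PySem.Int.floordiv (n + 1) 2)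

-- while tri(L) < test: L += 1
def upLoop (test L : Int) : Int :=
  if cn2 L < test then upLoop test (L + 1) else L
termination_by (2 * test - L).toNat
decreasing_by
  have := cn2_lt_imp_lt test L (by assumption)
  omega

-- while L > 0 and tri(L-1) >= test: L -= 1
def downLoop (test L : Int) : Int :=
  if 0 < L ∧ test ≤ cn2 (L - 1) then downLoop test (L - 1) else L
termination_by L.toNat
decreasing_by omega

def solution_alt (test : Int) : Int :=
  let g := isqrtNewton (8 * test + 1)
  let L0 := PySem.Int.floordiv (1 + g) 2
  let L1 := upLoop test L0
  let L := downLoop test L1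
  if cn2 L = test then L
  else (L - 1) + (test - cn2 (L - 1))

-- ===== PRECONDITION & SPEC =====
-- Pre_ excludes test < 0: there A's decrement loop never terminates (cn2 is always ≥ 0),
-- so A returns no value.
def Pre_solution (test : Int) : Prop := 0 ≤ test
instance (test : Int) : Decidable (Pre_solution test) := by unfold Pre_solution; infer_instance
def pvWitness_solution : Int := 7
def Spec_solution (test : Int) (out : Int) : Prop := out = solution_alt test
instance (test : Int) (out : Int) : Decidable (Spec_solution test out) := by unfold Spec_solution; infer_instance

-- ===== CLAIM (what is proved, stated in full; the proofs are below) =====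
def Claim_equal_solution : Prop := ∀ (test : Int), Dom_solution test → Pre_solution test → Spec_solution test (solution test)

-- ===== LEMMAS AND PROOFS =====

theorem two_cn2 (n : Int) : 2 * cn2 n = n * (n - 1) := by
  unfold cn2
  have h2 : PySem.Int.floordiv (n * (n - 1)) 2 = n * (n - 1) / 2 :=
    PySem.Int.floordiv_eq_ediv_of_pos (by omega)
  have he : n * (n - 1) % 2 + 2 * (n * (n - 1) / 2) = n * (n - 1) := Int.emod_add_mul_ediv _ _
  have hm : n * (n - 1) % 2 = 0 := by
    rcases Int.even_or_odd n with ⟨k, hk⟩ | ⟨k, hk⟩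
    · subst hk; have : (k + k) * (k + k - 1) = 2 * (k * (k + k - 1)) := by ring
      rw [this]; omega
    · subst hk; have : (2 * k + 1) * (2 * k + 1 - 1) = 2 * ((2 * k + 1) * k) := by ring
      rw [this]; omega
  omega

theorem cn2_mono {a b : Int} (h0 : 0 ≤ a) (hab : a ≤ b) : cn2 a ≤ cn2 b := by
  have ha := two_cn2 a
  have hb := two_cn2 b
  rcases eq_or_lt_of_le hab with h | h
  · subst h; omega
  · nlinarith [mul_nonneg (by omega : (0:Int) ≤ b - a) (by omega : (0:Int) ≤ b + a - 1)]

-- "L is the least nonnegative integer with cn2 L ≥ t"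
def LeastTri (t L : Int) : Prop :=
  0 ≤ L ∧ t ≤ cn2 L ∧ ∀ k, 0 ≤ k → k < L → cn2 k < t

theorem leastTri_unique {t L1 L2 : Int} (h1 : LeastTri t L1) (h2 : LeastTri t L2) :
    L1 = L2 := by
  obtain ⟨h10, h1t, h1lt⟩ := h1
  obtain ⟨h20, h2t, h2lt⟩ := h2
  by_contra hne
  rcases lt_or_gt_of_ne hne with h | h
  · have := h2lt L1 h10 h; omega
  · have := h1lt L2 h20 h; omega

theorem solLoop_least (t l r : Int) (h0 : 0 ≤ l) (hlr : l ≤ r) (hr : t ≤ cn2 r)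
    (hbelow : ∀ k, 0 ≤ k → k < l → cn2 k < t) : LeastTri t (solLoop t l r) := by
  rw [solLoop]
  by_cases hlt : l < r
  · rw [if_pos hlt]
    have hmid : PySem.Int.floordiv (l + r) 2 = (l + r) / 2 :=
      PySem.Int.floordiv_eq_ediv_of_pos (by omega)
    show LeastTri t (if cn2 (PySem.Int.floordiv (l + r) 2) < t
      then solLoop t (PySem.Int.floordiv (l + r) 2 + 1) r
      else solLoop t l (PySem.Int.floordiv (l + r) 2))
    set mid := PySem.Int.floordiv (l + r) 2 with hm
    have hb1 : l ≤ mid := by omega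
    have hb2 : mid < r := by omega
    by_cases hc : cn2 mid < t
    · rw [if_pos hc]
      refine solLoop_least t (mid + 1) r (by omega) (by omega) hr ?_
      intro k hk hkm
      exact lt_of_le_of_lt (cn2_mono hk (by omega)) hc
    · rw [if_neg hc]
      exact solLoop_least t l mid h0 (by omega) (by omega) hbelow
  · rw [if_neg hlt]
    have : l = r := by omega
    subst this
    exact ⟨h0, hr, hbelow⟩
termination_by (r - l).toNat
decreasing_by
  · have h : PySem.Int.floordiv (l + r) 2 = (l + r) / 2 :=
      PySem.Int.floordiv_eq_ediv_of_pos (by omega)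
    omega
  · have h : PySem.Int.floordiv (l + r) 2 = (l + r) / 2 :=
      PySem.Int.floordiv_eq_ediv_of_pos (by omega)
    omega

theorem newtonLoop_pos (n x y : Int) (hx : 1 ≤ x) : 1 ≤ newtonLoop n x y := by
  rw [newtonLoop]
  split
  · rename_i h
    exact newtonLoop_pos n y _ h.1
  · exact hx
termination_by x.toNat
decreasing_by omega

theorem upLoop_spec (t L : Int) : L ≤ upLoop t L ∧ t ≤ cn2 (upLoop t L) := by
  rw [upLoop]
  split
  · rename_i h
    have ih := upLoop_spec t (L + 1)
    exact ⟨by omega, ih.2⟩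
  · rename_i h
    exact ⟨le_refl _, by omega⟩
termination_by (2 * t - L).toNat
decreasing_by
  have := cn2_lt_imp_lt t L (by assumption)
  omega

theorem downLoop_least (t L : Int) (h0 : 0 ≤ L) (ht : t ≤ cn2 L) :
    LeastTri t (downLoop t L) := by
  rw [downLoop]
  split
  · rename_i h
    exact downLoop_least t (L - 1) (by omega) h.2
  · rename_i h
    refine ⟨h0, ht, fun k hk hkL => ?_⟩
    rcases Classical.em (0 < L) with hL | hL
    · have hne : ¬ t ≤ cn2 (L - 1) := fun hc => h ⟨hL, hc⟩
      have : cn2 k ≤ cn2 (L - 1) := cn2_mono hk (by omega)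
      omega
    · omega
termination_by L.toNat
decreasing_by omega

theorem solution_alt_least (t : Int) (ht : 0 ≤ t) :
    LeastTri t (downLoop t (upLoop t (PySem.Int.floordiv (1 + isqrtNewton (8 * t + 1)) 2))) := by
  have hg : 1 ≤ isqrtNewton (8 * t + 1) := newtonLoop_pos _ _ _ (by omega)
  have hL0 : 0 ≤ PySem.Int.floordiv (1 + isqrtNewton (8 * t + 1)) 2 := by
    have h : PySem.Int.floordiv (1 + isqrtNewton (8 * t + 1)) 2 = (1 + isqrtNewton (8 * t + 1)) / 2 :=
      PySem.Int.floordiv_eq_ediv_of_pos (by omega)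
    omega
  have hup := upLoop_spec t (PySem.Int.floordiv (1 + isqrtNewton (8 * t + 1)) 2)
  exact downLoop_least t _ (by omega) hup.2

theorem cn2_big : (2147483648 : Int) ≤ cn2 2648956421 := by
  have h := two_cn2 2648956421
  norm_num at h
  omega

theorem solution_least (t : Int) (ht : 0 ≤ t) (htop : t ≤ 2147483648) :
    LeastTri t (solLoop t 0 (MAXNUMBER - 1)) := by
  have hbig := cn2_big
  refine solLoop_least t 0 (MAXNUMBER - 1) (by omega) (by unfold MAXNUMBER; omega) ?_
    (fun k hk hk0 => by omega)
  show t ≤ cn2 (MAXNUMBER - 1)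
  have : MAXNUMBER - 1 = 2648956421 := by unfold MAXNUMBER; ring
  rw [this]; omega

-- when cn2 L > t and L is least, A's decrement loop stops after exactly one step
theorem solDown_eq (t L : Int) (ht : 0 ≤ t) (hL : LeastTri t L) (hne : cn2 L ≠ t) :
    solDown t L = L - 1 := by
  obtain ⟨h0, htL, hlt⟩ := hL
  have hgt : t < cn2 L := by omega
  have hL2 : 2 ≤ L := by
    have h2 := two_cn2 L
    by_contra hc
    rcases (by omega : L = 0 ∨ L = 1) with h | h <;> subst h <;> norm_num at h2 <;> omega
  have hprev : cn2 (L - 1) < t := hlt (L - 1) (by omega) (by omega)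
  rw [solDown]
  rw [if_pos ⟨hgt, by omega⟩]
  rw [solDown]
  rw [if_neg]
  omega

-- ===== VERDICT (by name: the statement is the Claim_ definition above) =====
theorem solution_spec : Claim_equal_solution := by
  intro t hdom hpre
  unfold Spec_solution solution solution_alt
  have ht : 0 ≤ t := hpre
  have htop : t ≤ 2147483648 := by
    unfold Dom_solution pvDomInt at hdom
    simp at hdom
    omega
  have hA := solution_least t ht htop
  have hB := solution_alt_least t ht
  have heq : solLoop t 0 (MAXNUMBER - 1)
      = downLoop t (upLoop t (PySem.Int.floordiv (1 + isqrtNewton (8 * t + 1)) 2)) :=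
    leastTri_unique hA hB
  simp only [← heq]
  set L := solLoop t 0 (MAXNUMBER - 1) with hLdef
  by_cases hc : cn2 L = t
  · simp [hc]
  · simp only [if_neg hc]
    rw [solDown_eq t L ht hA hc]
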